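-- pv_equiv track=rewrite | github.com/EzGrade/Tasks | 4.py | max_sum_index
-- ===== SOURCE A (Python) =====
-- def max_sum_index(tuples):
--     index, value = 0, sum(tuples[0])
--     for ind, x in enumerate(tuples):
--         temp = sum(x)
--         if temp > value:
--             value = temp
--             index = ind
--
--     return index
-- ===== SOURCE B (Python) =====
-- def max_sum_index(tuples):
--     sums = [sum(t) for t in tuples]
--     return sums.index(max(sums))
-- ===== Notes on version B (the rewrite author's own statement) =====
-- stated objective: idiomatic
-- what changed: B materializes the list of element sums once and returns sums.index(max(sums)) -- two standard-library passes replace A's manual enumerate loop that threads a running (index, value) state.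
import Mathlib
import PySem

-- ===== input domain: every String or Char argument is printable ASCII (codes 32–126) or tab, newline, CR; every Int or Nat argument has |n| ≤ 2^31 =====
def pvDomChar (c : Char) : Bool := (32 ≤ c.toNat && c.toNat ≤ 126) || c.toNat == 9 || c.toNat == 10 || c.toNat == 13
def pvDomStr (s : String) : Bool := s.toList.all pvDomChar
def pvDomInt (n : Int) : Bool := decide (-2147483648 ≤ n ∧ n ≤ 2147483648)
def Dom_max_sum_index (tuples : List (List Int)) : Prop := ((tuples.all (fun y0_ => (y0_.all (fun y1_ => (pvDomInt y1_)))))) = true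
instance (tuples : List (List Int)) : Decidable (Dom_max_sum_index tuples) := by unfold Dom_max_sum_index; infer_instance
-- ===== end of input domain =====

-- B replaces A's manual running-best loop by the idiomatic sums.index(max(sums));
-- equivalence of the return values is proved on nonempty input (A raises on []).

-- ===== PORT A =====
def max_sum_index (tuples : List (List Int)) : Int :=
  -- index, value = 0, sum(tuples[0])  (tuples[0] raises IndexError on []; excluded by Pre_)
  let value : Int := (tuples.headD []).sum
  let r := (PySem.List.enumerate tuples).foldl
    (fun (s : Int × Int) (p : Int × List Int) =>
      let temp := p.2.sum
      if temp > s.2 then (p.1, temp) else s) (0, value)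
  r.1

-- ===== PORT B =====
def max_sum_index_alt (tuples : List (List Int)) : Int :=
  let sums := tuples.map (fun t => t.sum)
  match PySem.List.max? sums (fun y => y) with
  | none => 0          -- max([]) raises ValueError; excluded by Pre_
  | some m =>
    match PySem.List.index? sums m with
    | none => 0        -- unreachable: the maximum is a member of sums
    | some j => (j : Int)

-- ===== PRECONDITION & SPEC =====
-- Pre_ excludes only the empty list, on which A raises IndexError (and B ValueError).
def Pre_max_sum_index (tuples : List (List Int)) : Prop := tuples ≠ []
instance (tuples : List (List Int)) : Decidable (Pre_max_sum_index tuples) := by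
  unfold Pre_max_sum_index; infer_instance
def pvWitness_max_sum_index : List (List Int) := [[1, 2], [3], []]

def Spec_max_sum_index (tuples : List (List Int)) (out : Int) : Prop := out = max_sum_index_alt tuples
instance (tuples : List (List Int)) (out : Int) : Decidable (Spec_max_sum_index tuples out) := by unfold Spec_max_sum_index; infer_instance

-- ===== CLAIM (what is proved, stated in full; the proofs are below) =====
def Claim_equal_max_sum_index : Prop := ∀ (tuples : List (List Int)), Dom_max_sum_index tuples → Pre_max_sum_index tuples → Spec_max_sum_index tuples (max_sum_index tuples)

-- ===== LEMMAS AND PROOFS =====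

-- A's loop body, abstracted over lists of precomputed sums.
def pvFam : List Int → Int → Int → Int → Int × Int
  | [], _, bi, bv => (bi, bv)
  | s :: r, k, bi, bv => if s > bv then pvFam r (k + 1) k s else pvFam r (k + 1) bi bv

lemma pvFoldA (ts : List (List Int)) : ∀ (k bi bv : Int),
    (PySem.List.enumerate ts k).foldl
      (fun (s : Int × Int) (p : Int × List Int) =>
        let temp := p.2.sum
        if temp > s.2 then (p.1, temp) else s) (bi, bv)
    = pvFam (ts.map (fun t => t.sum)) k bi bv := by
  induction ts with
  | nil => intro k bi bv; simp [PySem.List.enumerate_nil, pvFam]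
  | cons t ts ih =>
    intro k bi bv
    rw [PySem.List.enumerate_cons]
    simp only [List.foldl_cons, List.map_cons, pvFam]
    by_cases h : t.sum > bv
    · simp [h, ih]
    · simp [h, ih]

lemma pvFmaxLe (l : List Int) : ∀ (a : Int), a ≤ l.foldl max a := by
  induction l with
  | nil => intro a; simp
  | cons x r ih =>
    intro a
    calc a ≤ max a x := le_max_left a x
    _ ≤ r.foldl max (max a x) := ih (max a x)

lemma pvFmaxMem (l : List Int) : ∀ (a : Int), l.foldl max a ≠ a → l.foldl max a ∈ l := by
  induction l with
  | nil => intro a h; simp at h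
  | cons x r ih =>
    intro a h
    simp only [List.foldl_cons] at h ⊢
    by_cases hxa : x ≤ a
    · rw [max_eq_left hxa] at h ⊢
      exact List.mem_cons_of_mem _ (ih a h)
    · rw [max_eq_right (le_of_not_ge hxa)] at h ⊢
      by_cases hx : r.foldl max x = x
      · rw [hx]; exact List.mem_cons_self
      · exact List.mem_cons_of_mem _ (ih x hx)

-- Characterization of A's loop: it returns the first index of the maximum,
-- relative to the running best (bi, bv).
lemma pvFamEq (l : List Int) : ∀ (k bi bv : Int),
    pvFam l k bi bv =
      if bv < l.foldl max bv
      then (k + ((PySem.List.index? l (l.foldl max bv)).getD 0 : Int), l.foldl max bv)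
      else (bi, bv) := by
  induction l with
  | nil => intro k bi bv; simp [pvFam]
  | cons s r ih =>
    intro k bi bv
    simp only [List.foldl_cons, pvFam]
    by_cases hs : s > bv
    · rw [if_pos hs, max_eq_right (le_of_lt hs)]
      rw [ih (k + 1) k s]
      have hsM : s ≤ r.foldl max s := pvFmaxLe r s
      have hbvM : bv < r.foldl max s := lt_of_lt_of_le hs hsM
      rw [if_pos hbvM]
      by_cases hlt : s < r.foldl max s
      · rw [if_pos hlt]
        have hne : s ≠ r.foldl max s := ne_of_lt hlt
        have hmem : r.foldl max s ∈ r := pvFmaxMem r s (fun h => hne h.symm)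
        rw [PySem.List.index?_cons_of_ne _ hne]
        obtain ⟨j, hj⟩ := (PySem.List.index?_isSome_iff r (r.foldl max s)).mpr hmem
          |> Option.isSome_iff_exists.mp
        rw [hj]
        simp only [Option.map_some, Option.getD_some, Prod.mk.injEq]
        exact ⟨by push_cast; ring, trivial⟩
      · rw [if_neg hlt]
        have heq : r.foldl max s = s := le_antisymm (le_of_not_gt hlt) hsM
        rw [heq, PySem.List.index?_cons_self]
        simp
    · rw [if_neg hs, max_eq_left (le_of_not_gt hs)]
      rw [ih (k + 1) bi bv]
      by_cases hbv : bv < r.foldl max bv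
      · rw [if_pos hbv, if_pos hbv]
        have hsne : s ≠ r.foldl max bv := ne_of_lt (lt_of_le_of_lt (le_of_not_gt hs) hbv)
        have hmem : r.foldl max bv ∈ r :=
          pvFmaxMem r bv (fun h => absurd h.symm (ne_of_lt hbv))
        rw [PySem.List.index?_cons_of_ne _ hsne]
        obtain ⟨j, hj⟩ := (PySem.List.index?_isSome_iff r (r.foldl max bv)).mpr hmem
          |> Option.isSome_iff_exists.mp
        rw [hj]
        simp only [Option.map_some, Option.getD_some, Prod.mk.injEq]
        exact ⟨by push_cast; ring, trivial⟩
      · rw [if_neg hbv, if_neg hbv]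

-- ===== VERDICT (by name: the statement is the Claim_ definition above) =====
theorem max_sum_index_spec : Claim_equal_max_sum_index := by
  intro tuples _ hpre
  unfold Spec_max_sum_index max_sum_index max_sum_index_alt
  match tuples with
  | [] => exact absurd rfl hpre
  | t :: ts =>
    simp only [List.headD_cons]
    rw [pvFoldA, pvFamEq]
    simp only [List.map_cons]
    rw [PySem.List.max?_id_cons]
    simp only [List.foldl_cons, max_self]
    set sums := ts.map (fun t => t.sum) with hsums
    set M := sums.foldl max t.sum with hM
    have htM : t.sum ≤ M := pvFmaxLe sums t.sum
    by_cases h : t.sum < M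
    · rw [if_pos h]
      have hne : t.sum ≠ M := ne_of_lt h
      have hmem : M ∈ sums := pvFmaxMem sums t.sum (fun hh => hne hh.symm)
      rw [PySem.List.index?_cons_of_ne _ hne]
      obtain ⟨j, hj⟩ := (PySem.List.index?_isSome_iff sums M).mpr hmem
        |> Option.isSome_iff_exists.mp
      rw [hj]
      simp
    · rw [if_neg h]
      have heq : M = t.sum := le_antisymm (le_of_not_gt h) htM
      rw [heq, PySem.List.index?_cons_self]
      simp
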